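-- pv_equiv track=rewrite | github.com/zhaolijian/suanfa | shein1113/1.py | func
-- ===== SOURCE A (Python) =====
-- from collections import defaultdict
--
-- def func(s):
--     d = defaultdict(int)
--     another_d = defaultdict(list)
--     res = []
--     for ele in s:
--         if 'a' <= ele <= 'z':
--             d[ele] += 1
--         elif 'A' <= ele <= 'Z':
--             d[ele] += 1
--         elif ord('0') <= ord(ele) <= ord('9'):
--             d[ele] += 1
--         elif ele == ' ':
--             d[ele] += 1
--     for key, val in d.items():
--         another_d[val].append(key)
--     # key是个数,val是字符
--     for key in sorted(another_d.keys(), reverse=True):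
--         for val in sorted(another_d[key]):
--             res.append(val)
--     return ''.join(res)
-- ===== SOURCE B (Python) =====
-- def func(s):
--     d = {}
--     for ele in s:
--         if 'a' <= ele <= 'z' or 'A' <= ele <= 'Z' or '0' <= ele <= '9' or ele == ' ':
--             d[ele] = d.get(ele, 0) + 1
--     return ''.join(c for c, _ in sorted(d.items(), key=lambda kv: (-kv[1], kv[0])))
-- ===== Notes on version B (the rewrite author's own statement) =====
-- stated objective: simpler
-- what changed: B keeps the counting loop but drops A's inverse frequency->chars bucket dict and the two-level nested sorted loops, replacing them with one composite-key sort of the count dict's items by (-count, char) followed by a join.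
import Mathlib
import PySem

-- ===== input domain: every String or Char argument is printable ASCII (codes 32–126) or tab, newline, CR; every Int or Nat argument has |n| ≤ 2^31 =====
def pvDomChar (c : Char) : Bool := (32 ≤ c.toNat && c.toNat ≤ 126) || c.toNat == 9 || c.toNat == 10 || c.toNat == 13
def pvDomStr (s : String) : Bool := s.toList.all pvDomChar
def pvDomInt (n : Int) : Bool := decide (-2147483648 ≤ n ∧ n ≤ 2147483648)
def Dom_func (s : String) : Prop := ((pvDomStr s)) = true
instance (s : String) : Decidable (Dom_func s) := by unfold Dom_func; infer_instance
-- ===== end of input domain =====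

-- B drops A's inverse frequency->chars bucket dict and the two-level nested sorted
-- loops in favour of one composite-key sort of the count dict's items (objective: simpler).


-- ===== PORT A =====
-- literal port of A; ''.join over a list of single characters is String.mk (exact)
def func (s : String) : String :=
  let d : PySem.Dict Char Int := s.toList.foldl (fun d ele =>
    if 'a' ≤ ele ∧ ele ≤ 'z' then d.modify ele 0 (· + 1)
    else if 'A' ≤ ele ∧ ele ≤ 'Z' then d.modify ele 0 (· + 1)
    else if ('0').toNat ≤ ele.toNat ∧ ele.toNat ≤ ('9').toNat then d.modify ele 0 (· + 1)
    else if ele = ' ' then d.modify ele 0 (· + 1)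
    else d) PySem.Dict.empty
  let another : PySem.Dict Int (List Char) :=
    d.items.foldl (fun ad p => ad.modify p.2 [] (· ++ [p.1])) PySem.Dict.empty
  let res : List Char :=
    (PySem.List.sorted another.keys (fun k => k) true).foldl (fun res key =>
      (PySem.List.sorted (another.getD key []) (fun v => v) false).foldl
        (fun res v => res ++ [v]) res) []
  String.mk res

-- ===== PORT B =====
-- literal port of Source B; the composite sort key (-count, char) is PySem.List.sorted2
def func_alt (s : String) : String :=
  let d : PySem.Dict Char Int := s.toList.foldl (fun d ele =>
    if ('a' ≤ ele ∧ ele ≤ 'z') ∨ ('A' ≤ ele ∧ ele ≤ 'Z') ∨ ('0' ≤ ele ∧ ele ≤ '9') ∨ ele = ' '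
    then d.insert ele (d.getD ele 0 + 1) else d) PySem.Dict.empty
  String.mk ((PySem.List.sorted2 d.items (fun kv => -kv.2) (fun kv => kv.1) false).map (fun kv => kv.1))

-- ===== PRECONDITION & SPEC =====
def Spec_func (s : String) (out : String) : Prop := out = func_alt s
instance (s : String) (out : String) : Decidable (Spec_func s out) := by unfold Spec_func; infer_instance

-- ===== CLAIM (what is proved, stated in full; the proofs are below) =====
def Claim_equal_func : Prop := ∀ (s : String), Dom_func s → Spec_func s (func s)

-- ===== LEMMAS AND PROOFS =====

-- the character filter shared by both counting loops
def pvCond (ele : Char) : Bool :=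
  decide (('a' ≤ ele ∧ ele ≤ 'z') ∨ ('A' ≤ ele ∧ ele ≤ 'Z') ∨ ('0' ≤ ele ∧ ele ≤ '9') ∨ ele = ' ')



theorem char_le_iff (a b : Char) : a ≤ b ↔ a.toNat ≤ b.toNat := by
  rw [Char.le_def, UInt32.le_iff_toNat_le]; rfl

theorem char_eq_space_iff (e : Char) : e = ' ' ↔ e.toNat = 32 := by
  constructor
  · rintro rfl; rfl
  · intro h
    apply Char.ext
    apply UInt32.toNat_inj.mp
    exact h

theorem countB_eq_counter (cs : List Char) :
    cs.foldl (fun d ele =>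
      if ('a' ≤ ele ∧ ele ≤ 'z') ∨ ('A' ≤ ele ∧ ele ≤ 'Z') ∨ ('0' ≤ ele ∧ ele ≤ '9') ∨ ele = ' '
      then d.insert ele (d.getD ele 0 + 1) else d) PySem.Dict.empty
      = PySem.Dict.counter (cs.filter pvCond) := by
  rw [PySem.Dict.counter_eq_foldl, List.foldl_filter]
  congr 1
  funext d e
  simp only [pvCond, decide_eq_true_eq]
  split_ifs <;> rfl

theorem countA_eq_counter (cs : List Char) :
    cs.foldl (fun d ele =>
      if 'a' ≤ ele ∧ ele ≤ 'z' then d.modify ele 0 (· + 1)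
      else if 'A' ≤ ele ∧ ele ≤ 'Z' then d.modify ele 0 (· + 1)
      else if ('0').toNat ≤ ele.toNat ∧ ele.toNat ≤ ('9').toNat then d.modify ele 0 (· + 1)
      else if ele = ' ' then d.modify ele 0 (· + 1)
      else d) PySem.Dict.empty = PySem.Dict.counter (cs.filter pvCond) := by
  rw [PySem.Dict.counter_eq_foldl, List.foldl_filter]
  congr 1
  funext d e
  simp only [pvCond, decide_eq_true_eq, char_le_iff, char_eq_space_iff]
  split_ifs with h1 h2 h3 h4 h5 <;> first | rfl | omega






theorem flatMap_perm_congr {α β : Type} (l : List α) (f g : α → List β)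
    (h : ∀ x ∈ l, (f x).Perm (g x)) : (l.flatMap f).Perm (l.flatMap g) := by
  induction l with
  | nil => rfl
  | cons y ys ih =>
    simp only [List.flatMap_cons]
    exact (h y (by simp)).append (ih (fun x hx => h x (by simp [hx])))

theorem flatMap_filter_perm (ks : List Int) (l : List (Char × Int))
    (hnd : ks.Nodup) (hmem : ∀ p ∈ l, p.2 ∈ ks) :
    (ks.flatMap fun c => l.filter (fun p => p.2 == c)).Perm l := by
  induction ks generalizing l with
  | nil =>
    have : l = [] := List.eq_nil_iff_forall_not_mem.mpr (fun p hp => by simpa using hmem p hp)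
    simp [this]
  | cons c ks ih =>
    simp only [List.flatMap_cons]
    have hc : c ∉ ks := (List.nodup_cons.mp hnd).1
    have h1 : (ks.flatMap fun c' => l.filter (fun p => p.2 == c'))
        = ks.flatMap fun c' => (l.filter (fun p => !(p.2 == c))).filter (fun p => p.2 == c') := by
      apply List.flatMap_congr
      intro c' hc'
      rw [List.filter_filter]
      apply List.filter_congr
      intro p _
      by_cases h : p.2 = c'
      · have : c' ≠ c := fun hh => hc (hh ▸ hc')
        simp [h, this]
      · simp [h]
    rw [h1]
    have h2 := ih (l.filter (fun p => !(p.2 == c))) (List.nodup_cons.mp hnd).2 (by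
      intro p hp
      have hpl := List.mem_of_mem_filter hp
      have := List.of_mem_filter hp
      have hne : p.2 ≠ c := by simpa using this
      have := hmem p hpl
      simp only [List.mem_cons] at this
      tauto)
    exact (List.Perm.append_left _ h2).trans (List.filter_append_perm _ l)

theorem pairwise_flatMap {α β : Type} (l : List α) (f : α → List β)
    (S : α → α → Prop) (R : β → β → Prop)
    (hl : List.Pairwise S l) (hin : ∀ x ∈ l, List.Pairwise R (f x))
    (hcross : ∀ x ∈ l, ∀ y ∈ l, S x y → ∀ a ∈ f x, ∀ b ∈ f y, R a b) :
    List.Pairwise R (l.flatMap f) := by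
  induction l with
  | nil => simp
  | cons y ys ih =>
    simp only [List.flatMap_cons, List.pairwise_append]
    refine ⟨hin y (by simp), ?_, ?_⟩
    · exact ih (List.pairwise_cons.mp hl).2 (fun x hx => hin x (by simp [hx]))
        (fun x hx y' hy' => hcross x (by simp [hx]) y' (by simp [hy']))
    · intro a ha b hb
      simp only [List.mem_flatMap] at hb
      obtain ⟨x, hx, hbx⟩ := hb
      exact hcross y (by simp) x (by simp [hx]) ((List.pairwise_cons.mp hl).1 x hx) a ha b hbx

theorem map_insertBy {α β : Type} [LinearOrder β] (f : α → β) (x : α) (l : List α) :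
    (PySem.List.insertBy (fun a b => decide (f a < f b)) x l).map f
      = PySem.List.insertBy (fun a b => decide (a < b)) (f x) (l.map f) := by
  induction l with
  | nil => rfl
  | cons y ys ih =>
    by_cases h : f x < f y
    · simp [PySem.List.insertBy, h]
    · simp [PySem.List.insertBy, h, ih]

theorem foldl_insertBy_map {α β : Type} [LinearOrder β] (f : α → β) (l : List α) (acc : List α) :
    (l.foldl (fun a x => PySem.List.insertBy (fun a b => decide (f a < f b)) x a) acc).map f
      = (l.map f).foldl (fun a x => PySem.List.insertBy (fun a b => decide (a < b)) x a) (acc.map f) := by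
  induction l generalizing acc with
  | nil => rfl
  | cons y ys ih => simp only [List.foldl_cons, List.map_cons, ih, map_insertBy]

theorem sorted_map_id {α β : Type} [LinearOrder β] (f : α → β) (l : List α) :
    PySem.List.sorted (l.map f) (fun x => x) false = (PySem.List.sorted l f false).map f := by
  rw [PySem.List.sorted_eq_foldl_insertBy, PySem.List.sorted_eq_foldl_insertBy,
    foldl_insertBy_map]
  rfl

theorem sorted2_eq_sorted_lex {α κ₁ κ₂ : Type} [LinearOrder κ₁] [LinearOrder κ₂]
    (xs : List α) (k1 : α → κ₁) (k2 : α → κ₂) :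
    PySem.List.sorted2 xs k1 k2 false
      = PySem.List.sorted xs (fun a => toLex (k1 a, k2 a)) false := by
  have hb : (fun a b => decide (k1 a < k1 b) || !decide (k1 b < k1 a) && decide (k2 a < k2 b))
      = (fun a b => decide (toLex (k1 a, k2 a) < toLex (k1 b, k2 b))) := by
    funext a b
    rcases lt_trichotomy (k1 a) (k1 b) with h | h | h
    · simp [Prod.Lex.lt_iff, h]
    · simp [Prod.Lex.lt_iff, h]
    · simp [Prod.Lex.lt_iff, h, not_lt_of_gt h, (ne_of_lt h).symm]
  show List.foldl (fun acc x => PySem.List.insertBy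
      (fun a b => decide (k1 a < k1 b) || !decide (k1 b < k1 a) && decide (k2 a < k2 b)) x acc) [] xs = _
  rw [hb]
  rfl

theorem main_items (items : List (Char × Int)) (hnd : (items.map Prod.fst).Nodup) :
    ((PySem.List.sorted
        (items.foldl (fun ad p => ad.modify p.2 [] (· ++ [p.1])) PySem.Dict.empty).keys
        (fun k => k) true).foldl (fun res key =>
          (PySem.List.sorted
            ((items.foldl (fun ad p => ad.modify p.2 [] (· ++ [p.1])) PySem.Dict.empty).getD key [])
            (fun v => v) false).foldl (fun res v => res ++ [v]) res) [])
      = (PySem.List.sorted2 items (fun kv => -kv.2) (fun kv => kv.1) false).map (fun kv => kv.1) := by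
  set another := items.foldl (fun ad p => ad.modify p.2 [] (· ++ [p.1])) PySem.Dict.empty with hanother
  have hkeys : another.keys = PySem.Set.ofList (items.map Prod.snd) := by
    rw [hanother, PySem.Dict.keys_foldl_modify_key items Prod.snd [] (fun _ x => (· ++ [x.1]))]
    rfl
  have hgetD : ∀ c, another.getD c [] = (items.filter (fun p => p.2 == c)).map Prod.fst := by
    intro c
    have hsw : another = (items.map Prod.swap).foldl
        (fun ad p => ad.modify p.1 [] (· ++ [p.2])) PySem.Dict.empty := by
      rw [hanother, List.foldl_map]
      rfl
    rw [hsw, PySem.Dict.getD_foldl_modify_append]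
    simp [List.filter_map, List.map_map, Function.comp_def]
  set outer := PySem.List.sorted another.keys (fun k => k) true with houter
  have houter_nodup : outer.Nodup := by
    refine (PySem.List.sorted_perm another.keys (fun k => k) true).symm.nodup ?_
    rw [hkeys]
    exact PySem.Set.nodup_ofList _
  have houter_pw : outer.Pairwise (fun a b => b < a) := by
    have h1 := PySem.List.sorted_pairwise_rev another.keys (fun k => k)
    have h2 : outer.Pairwise (fun a b => a ≠ b) := houter_nodup
    exact (h1.and h2).imp (fun hab => lt_of_le_of_ne hab.1 (Ne.symm hab.2))
  have hmem' : ∀ p ∈ items, p.2 ∈ outer := by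
    intro p hp
    rw [houter, PySem.List.mem_sorted, hkeys, PySem.Set.mem_ofList]
    exact List.mem_map_of_mem hp
  -- rewrite the nested loops into a flatMap
  have hloop : ∀ (acc : List Char) (ks : List Int),
      ks.foldl (fun res key =>
        (PySem.List.sorted (another.getD key []) (fun v => v) false).foldl
          (fun res v => res ++ [v]) res) acc
      = acc ++ ks.flatMap (fun key => PySem.List.sorted (another.getD key []) (fun v => v) false) := by
    intro acc ks
    have : (fun res key =>
        (PySem.List.sorted (another.getD key []) (fun v => v) false).foldl
          (fun res v => res ++ [v]) res)
        = fun res key => res ++ PySem.List.sorted (another.getD key []) (fun v => v) false := by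
      funext res key
      simpa using PySem.List.foldl_append_eq_flatMap (fun v => [v])
        (PySem.List.sorted (another.getD key []) (fun v => v) false) res
    rw [this, PySem.List.foldl_append_eq_flatMap]
  rw [hloop]
  -- identify each bucket with a sorted filtered slice, mapped through fst
  have hbucket : ∀ c, PySem.List.sorted (another.getD c []) (fun v => v) false
      = (PySem.List.sorted (items.filter (fun p => p.2 == c)) (fun p => p.1) false).map Prod.fst := by
    intro c
    rw [hgetD c]
    exact sorted_map_id Prod.fst _
  rw [List.flatMap_congr (fun c _ => hbucket c)]
  rw [← List.map_flatMap]
  -- B's side: a single lexicographic sort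
  rw [sorted2_eq_sorted_lex]
  have hsort : PySem.List.sorted items (fun kv => toLex (-kv.2, kv.1)) false
      = outer.flatMap (fun c => PySem.List.sorted (items.filter (fun p => p.2 == c)) (fun p => p.1) false) := by
    apply PySem.List.sorted_eq_of_perm_of_pairwise_lt
    · refine (flatMap_perm_congr outer _ _ ?_).trans (flatMap_filter_perm outer items houter_nodup hmem')
      intro c _
      exact PySem.List.sorted_perm _ _ _
    · refine pairwise_flatMap outer _ (fun a b => b < a) _ houter_pw ?_ ?_
      · intro c _
        have hle := PySem.List.sorted_pairwise (items.filter (fun p => p.2 == c)) (fun p => p.1)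
        have hndf : ((PySem.List.sorted (items.filter (fun p => p.2 == c)) (fun p => p.1) false).map Prod.fst).Nodup := by
          refine ((PySem.List.sorted_perm (items.filter (fun p => p.2 == c)) (fun p => p.1) false).map Prod.fst).symm.nodup ?_
          exact List.Sublist.nodup (List.filter_sublist.map Prod.fst) hnd
        have hne : (PySem.List.sorted (items.filter (fun p => p.2 == c)) (fun p => p.1) false).Pairwise
            (fun a b => a.1 ≠ b.1) := List.pairwise_map.mp hndf
        refine List.Pairwise.imp_of_mem ?_ (hle.and hne)
        intro a b ha hb hab
        have ha2 : a.2 = c := by simpa using (List.of_mem_filter ((PySem.List.mem_sorted _ _ _ _).mp ha))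
        have hb2 : b.2 = c := by simpa using (List.of_mem_filter ((PySem.List.mem_sorted _ _ _ _).mp hb))
        rw [Prod.Lex.lt_iff]
        right
        constructor
        · simp [ha2, hb2]
        · exact lt_of_le_of_ne hab.1 hab.2
      · intro x _ y _ hxy a ha b hb
        have ha2 : a.2 = x := by simpa using (List.of_mem_filter ((PySem.List.mem_sorted _ _ _ _).mp ha))
        have hb2 : b.2 = y := by simpa using (List.of_mem_filter ((PySem.List.mem_sorted _ _ _ _).mp hb))
        rw [Prod.Lex.lt_iff]
        left
        simp only [ofLex_toLex, ha2, hb2]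
        omega
  rw [hsort]
  simp

theorem func_eq_alt (s : String) : func s = func_alt s := by
  unfold func func_alt
  rw [countA_eq_counter, countB_eq_counter]
  have hnd : (((PySem.Dict.counter (s.toList.filter pvCond)).items).map Prod.fst).Nodup := by
    rw [PySem.Dict.items_counter]
    simpa [List.map_map, Function.comp_def] using
      PySem.Set.nodup_ofList (s.toList.filter pvCond)
  exact congrArg String.mk (main_items _ hnd)

-- ===== VERDICT (by name: the statement is the Claim_ definition above) =====
theorem func_spec : Claim_equal_func := by
  intro s _
  unfold Spec_func
  exact func_eq_alt s
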